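-- pv_equiv track=rewrite | github.com/devendra-ghormare/DSA | array/left_rotation_k_place.py | leftRotationByKPlaces
-- ===== SOURCE A (Python) =====
-- def leftRotationByKPlaces(arr, k):
--     n = len(arr)
--     k = k % n
--
--     def reverse_array(arr, left, right):
--         while left <= right:
--             arr[left], arr[right] = arr[right], arr[left]
--             left += 1
--             right -= 1
--
--     reverse_array(arr, 0, k-1)
--     reverse_array(arr, k, n-1)
--     reverse_array(arr, 0, n-1)
--
--     return arr
-- ===== SOURCE B (Python) =====
-- def leftRotationByKPlaces(arr, k):
--     n = len(arr)
--     k = k % n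
--     arr[:] = arr[k:] + arr[:k]
--     return arr
-- ===== Notes on version B (the rewrite author's own statement) =====
-- stated objective: idiomatic
-- what changed: Replaces the three in-place index-swapping reversal loops with a single in-place slice assignment arr[:] = arr[k:] + arr[:k] that rebuilds the rotated list from two slices, with no Python-level loops.
import Mathlib
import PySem

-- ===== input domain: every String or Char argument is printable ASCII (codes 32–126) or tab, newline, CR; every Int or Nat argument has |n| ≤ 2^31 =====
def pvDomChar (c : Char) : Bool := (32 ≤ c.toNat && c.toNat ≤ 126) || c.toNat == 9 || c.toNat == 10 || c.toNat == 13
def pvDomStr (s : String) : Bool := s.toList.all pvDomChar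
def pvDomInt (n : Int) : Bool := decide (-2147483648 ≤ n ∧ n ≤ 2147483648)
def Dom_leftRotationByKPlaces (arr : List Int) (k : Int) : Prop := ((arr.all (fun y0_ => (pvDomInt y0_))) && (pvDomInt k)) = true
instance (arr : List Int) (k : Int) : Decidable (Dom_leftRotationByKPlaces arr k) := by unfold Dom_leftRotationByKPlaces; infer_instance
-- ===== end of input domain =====

-- B rotates by one in-place slice assignment (arr[:] = arr[k:] + arr[:k]) instead of A's
-- three index-swapping reversal passes; equivalence is about the return value (both also
-- mutate arr in place to that same value).

-- ===== PORT A =====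
-- arr[left], arr[right] = arr[right], arr[left]  (indices are in range whenever the loop runs)
def pySwap (xs : List Int) (l r : Int) : List Int :=
  match PySem.List.pyGet? xs l, PySem.List.pyGet? xs r with
  | some a, some b => (xs.set l.toNat b).set r.toNat a
  | _, _ => xs

-- the 'while left <= right' loop of reverse_array
def revLoop (xs : List Int) (l r : Int) : List Int :=
  if l ≤ r then revLoop (pySwap xs l r) (l + 1) (r - 1) else xs
termination_by (r + 1 - l).toNat
decreasing_by omega

def leftRotationByKPlaces (arr : List Int) (k : Int) : List Int :=
  let n : Int := arr.length
  let k' := PySem.Int.mod k n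
  let a1 := revLoop arr 0 (k' - 1)
  let a2 := revLoop a1 k' (n - 1)
  revLoop a2 0 (n - 1)

-- ===== PORT B =====
def leftRotationByKPlaces_alt (arr : List Int) (k : Int) : List Int :=
  let n : Int := arr.length
  let k' := PySem.Int.mod k n
  PySem.List.slice arr (some k') none ++ PySem.List.slice arr none (some k')

-- ===== PRECONDITION & SPEC =====
-- Pre_ excludes only the empty list, on which Python's 'k % len(arr)' raises ZeroDivisionError (in A and in B alike).
def Pre_leftRotationByKPlaces (arr : List Int) (k : Int) : Prop := arr ≠ []
instance (arr : List Int) (k : Int) : Decidable (Pre_leftRotationByKPlaces arr k) := by unfold Pre_leftRotationByKPlaces; infer_instance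

def pvWitness_leftRotationByKPlaces : List Int × Int := ([1, 2, 3, 4, 5], 2)

def Spec_leftRotationByKPlaces (arr : List Int) (k : Int) (out : List Int) : Prop := out = leftRotationByKPlaces_alt arr k
instance (arr : List Int) (k : Int) (out : List Int) : Decidable (Spec_leftRotationByKPlaces arr k out) := by unfold Spec_leftRotationByKPlaces; infer_instance

-- ===== CLAIM (what is proved, stated in full; the proofs are below) =====
def Claim_equal_leftRotationByKPlaces : Prop := ∀ (arr : List Int) (k : Int), Dom_leftRotationByKPlaces arr k → Pre_leftRotationByKPlaces arr k → Spec_leftRotationByKPlaces arr k (leftRotationByKPlaces arr k)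

-- ===== LEMMAS AND PROOFS =====

-- reading the element at the junction of an append
lemma get_mid (a c : List Int) (x : Int) :
    PySem.List.pyGet? (a ++ x :: c) (a.length : Int) = some x := by
  simp

-- writing the element at the junction of an append
lemma set_mid (a c : List Int) (x v : Int) :
    (a ++ x :: c).set a.length v = a ++ v :: c := by
  induction a with
  | nil => simp
  | cons h t ih => simp [ih]

-- one swap exchanges the two ends of the middle segment
lemma swap_mid (a m c : List Int) (x y : Int) :
    pySwap (a ++ x :: (m ++ y :: c)) (a.length : Int) ((a.length : Int) + (m.length : Int) + 1)
      = a ++ y :: (m ++ x :: c) := by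
  have h1 : PySem.List.pyGet? (a ++ x :: (m ++ y :: c)) (a.length : Int) = some x := get_mid a (m ++ y :: c) x
  have e2 : a ++ x :: (m ++ y :: c) = (a ++ x :: m) ++ y :: c := by simp
  have hlen : ((a ++ x :: m).length : Int) = (a.length : Int) + (m.length : Int) + 1 := by
    simp; omega
  have h2 : PySem.List.pyGet? (a ++ x :: (m ++ y :: c)) ((a.length : Int) + (m.length : Int) + 1) = some y := by
    rw [e2, ← hlen]; exact get_mid (a ++ x :: m) c y
  have ht1 : ((a.length : Int)).toNat = a.length := by omega
  have ht2 : (((a.length : Int) + (m.length : Int) + 1)).toNat = a.length + m.length + 1 := by omega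
  rw [pySwap, h1, h2]
  simp only [ht1, ht2]
  have s1 : (a ++ x :: (m ++ y :: c)).set a.length y = a ++ y :: (m ++ y :: c) :=
    set_mid a (m ++ y :: c) x y
  rw [s1]
  have e3 : a ++ y :: (m ++ y :: c) = (a ++ y :: m) ++ y :: c := by simp
  have e4 : a.length + m.length + 1 = (a ++ y :: m).length := by simp; omega
  rw [e3, e4, set_mid (a ++ y :: m) c y x]
  simp

-- the while-loop reverses exactly the segment [a.length, a.length + b.length - 1]
lemma revLoop_seg : ∀ (nn : Nat) (b a c : List Int), b.length = nn →
    revLoop (a ++ b ++ c) (a.length : Int) ((a.length : Int) + (b.length : Int) - 1)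
      = a ++ b.reverse ++ c := by
  intro nn
  induction nn using Nat.strong_induction_on with
  | _ nn ih =>
    intro b a c hb
    match b with
    | [] =>
      rw [revLoop, if_neg (by simp)]
      simp
    | [x] =>
      rw [revLoop, if_pos (by simp)]
      have hr : ((a.length : Int) + (([x] : List Int).length : Int) - 1) = (a.length : Int) := by
        simp
      rw [hr]
      have hs : pySwap (a ++ [x] ++ c) (a.length : Int) (a.length : Int) = a ++ [x] ++ c := by
        have e : a ++ [x] ++ c = a ++ x :: c := by simp
        rw [e, pySwap, get_mid]
        have ht : ((a.length : Int)).toNat = a.length := by omega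
        simp only [ht]
        rw [set_mid, set_mid]
      rw [hs, revLoop, if_neg (by omega)]
      simp
    | x :: h :: t =>
      obtain ⟨m, y, he⟩ : ∃ m y, h :: t = m ++ [y] := by
        rcases List.eq_nil_or_concat (h :: t) with h0 | ⟨m, y, h0⟩
        · simp at h0
        · exact ⟨m, y, by simpa [List.concat_eq_append] using h0⟩
      rw [he] at hb ⊢
      rw [revLoop, if_pos (by simp; omega)]
      have hr : ((a.length : Int) + ((x :: (m ++ [y])).length : Int) - 1)
          = (a.length : Int) + (m.length : Int) + 1 := by simp; omega
      rw [hr]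
      have e0 : a ++ (x :: (m ++ [y])) ++ c = a ++ x :: (m ++ y :: c) := by simp
      rw [e0, swap_mid a m c x y]
      have e1 : a ++ y :: (m ++ x :: c) = (a ++ [y]) ++ m ++ (x :: c) := by simp
      have hlen' : (((a ++ [y]) : List Int).length : Int) = (a.length : Int) + 1 := by simp
      have hih := ih m.length (by simp at hb; omega) m (a ++ [y]) (x :: c) rfl
      rw [hlen'] at hih
      rw [show ((a.length : Int) + (m.length : Int) + 1 - 1)
            = (a.length : Int) + 1 + (m.length : Int) - 1 by ring]
      rw [e1, hih]
      simp

lemma mod_bounds (k n : Int) (hn : 0 < n) :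
    0 ≤ PySem.Int.mod k n ∧ PySem.Int.mod k n < n := by
  rw [PySem.Int.mod_eq_emod_of_pos hn]
  exact ⟨Int.emod_nonneg k (by omega), Int.emod_lt_of_pos k hn⟩

-- ===== VERDICT (by name: the statement is the Claim_ definition above) =====
theorem leftRotationByKPlaces_spec : Claim_equal_leftRotationByKPlaces := by
  intro arr k _ hpre
  have hn : 0 < (arr.length : Int) := by
    cases arr with
    | nil => exact absurd rfl hpre
    | cons h t => simp
  set n : Int := (arr.length : Int) with hndef
  obtain ⟨hk0, hkn⟩ := mod_bounds k n hn
  set k' := PySem.Int.mod k n with hk'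
  set kn : Nat := k'.toNat with hkn'
  have hkc : (kn : Int) = k' := by omega
  have hknle : kn ≤ arr.length := by omega
  show leftRotationByKPlaces arr k = leftRotationByKPlaces_alt arr k
  simp only [leftRotationByKPlaces, leftRotationByKPlaces_alt]
  rw [← hndef, ← hk']
  -- B's value
  have hB : PySem.List.slice arr (some k') none ++ PySem.List.slice arr none (some k')
      = arr.drop kn ++ arr.take kn := by
    rw [PySem.List.slice_from _ hk0, PySem.List.slice_to _ hk0]
  -- A, step 1
  have s1 : revLoop arr 0 (k' - 1) = (arr.take kn).reverse ++ arr.drop kn := by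
    have := revLoop_seg kn (arr.take kn) [] (arr.drop kn) (by simp [List.length_take]; omega)
    simp only [List.nil_append, List.length_nil, Nat.cast_zero, Int.zero_add] at this
    rw [List.take_append_drop] at this
    have hl : ((arr.take kn).length : Int) = (kn : Int) := by
      simp [List.length_take]; omega
    rw [hl, hkc] at this
    exact this
  -- A, step 2
  have s2 : revLoop ((arr.take kn).reverse ++ arr.drop kn) k' (n - 1)
      = (arr.take kn).reverse ++ (arr.drop kn).reverse := by
    have := revLoop_seg (arr.drop kn).length (arr.drop kn) (arr.take kn).reverse [] rfl
    simp only [List.append_nil] at this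
    have hl : (((arr.take kn).reverse).length : Int) = k' := by
      simp [List.length_take]; omega
    have hl2 : ((arr.drop kn).length : Int) = n - k' := by
      simp [List.length_drop, hndef]; omega
    rw [hl, hl2, show (k' + (n - k') - 1) = n - 1 by ring] at this
    exact this
  -- A, step 3
  have s3 : revLoop ((arr.take kn).reverse ++ (arr.drop kn).reverse) 0 (n - 1)
      = arr.drop kn ++ arr.take kn := by
    have := revLoop_seg ((arr.take kn).reverse ++ (arr.drop kn).reverse).length
        ((arr.take kn).reverse ++ (arr.drop kn).reverse) [] [] rfl
    simp only [List.nil_append, List.append_nil, List.length_nil, Nat.cast_zero] at this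
    have hl : ((((arr.take kn).reverse ++ (arr.drop kn).reverse)).length : Int) = n := by
      simp [List.length_take, List.length_drop, hndef]; omega
    rw [hl, show ((0 : Int) + n - 1) = n - 1 by ring] at this
    rw [this]
    simp
  simp only [s1, s2, s3, hB]
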